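-- pv_equiv track=rewrite | github.com/yu-kei-love/FX-AI | research/boat/betting_logic.py | _format_course_display
-- ===== SOURCE A (Python) =====
-- def _format_course_display(course_taken: dict) -> str:
--     """進入コース表示文字列を生成する。例: "3-1-2-4-5-6"""
--     if not course_taken:
--         return "1-2-3-4-5-6"
--     # コース→艇番のマッピングに変換して表示
--     course_to_lane = {v: k for k, v in course_taken.items()}
--     result = []
--     for c in range(1, 7):
--         lane = course_to_lane.get(c, "?")
--         result.append(str(lane))
--     return "-".join(result)
-- ===== SOURCE B (Python) =====
-- def _format_course_display(course_taken: dict) -> str: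
--     """進入コース表示文字列を生成する。例: "3-1-2-4-5-6"""
--     if not course_taken:
--         return "1-2-3-4-5-6"
--     # scatter: place each boat directly into its course slot, one pass
--     result = ["?"] * 6
--     for lane, course in course_taken.items():
--         if course in range(1, 7):
--             result[course - 1] = str(lane)
--     return "-".join(result)
-- ===== Notes on version B (the rewrite author's own statement) =====
-- stated objective: idiomatic
-- what changed: Instead of inverting the dict into course->lane and then looking up each of courses 1..6, B allocates a fixed 6-slot list of '?' and scatters each boat's lane into its course slot in one pass over the items.
import Mathlib
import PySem

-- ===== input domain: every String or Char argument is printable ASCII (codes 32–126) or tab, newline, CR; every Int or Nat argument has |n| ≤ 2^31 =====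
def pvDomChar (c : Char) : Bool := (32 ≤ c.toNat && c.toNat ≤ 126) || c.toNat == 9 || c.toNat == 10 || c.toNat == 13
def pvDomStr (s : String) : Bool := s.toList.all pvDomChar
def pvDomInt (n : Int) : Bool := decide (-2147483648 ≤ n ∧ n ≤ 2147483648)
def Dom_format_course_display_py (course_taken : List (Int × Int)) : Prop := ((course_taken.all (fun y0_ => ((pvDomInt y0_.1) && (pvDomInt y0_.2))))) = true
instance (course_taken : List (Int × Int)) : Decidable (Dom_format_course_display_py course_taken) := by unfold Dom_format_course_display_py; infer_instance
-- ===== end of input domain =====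

-- B replaces the dict inversion + 6 lookups by scattering each boat into a fixed 6-slot list in one pass (idiomatic).


-- ===== PORT A =====
def format_course_display_py (course_taken : List (Int × Int)) : String :=
  if course_taken = [] then "1-2-3-4-5-6"
  else
    let course_to_lane : PySem.Dict Int Int :=
      (PySem.Dict.ofList course_taken).items.foldl
        (fun d kv => d.insert kv.2 kv.1) PySem.Dict.empty
    let result : List String :=
      (PySem.List.pyRange 1 7 1).map (fun c =>
        match course_to_lane.get? c with
        | some lane => PySem.Int.toStr lane
        | none => "?")
    PySem.Str.join "-" result

-- ===== PORT B =====
def format_course_display_py_alt (course_taken : List (Int × Int)) : String :=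
  if course_taken = [] then "1-2-3-4-5-6"
  else
    let result : List String :=
      (PySem.Dict.ofList course_taken).items.foldl
        (fun (res : List String) kv =>
          if 1 ≤ kv.2 ∧ kv.2 < 7 then res.set (kv.2 - 1).toNat (PySem.Int.toStr kv.1) else res)
        (List.replicate 6 "?")
    PySem.Str.join "-" result

-- ===== PRECONDITION & SPEC =====
def Spec_format_course_display_py (course_taken : List (Int × Int)) (out : String) : Prop := out = format_course_display_py_alt course_taken
instance (course_taken : List (Int × Int)) (out : String) : Decidable (Spec_format_course_display_py course_taken out) := by unfold Spec_format_course_display_py; infer_instance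

-- ===== CLAIM (what is proved, stated in full; the proofs are below) =====
def Claim_equal_format_course_display_py : Prop := ∀ (course_taken : List (Int × Int)), Dom_format_course_display_py course_taken → Spec_format_course_display_py course_taken (format_course_display_py course_taken)

-- ===== LEMMAS AND PROOFS =====

/-- the display cell for course `c` read off the inverted dict -/
def pvCell (d : PySem.Dict Int Int) (c : Int) : String :=
  match d.get? c with
  | some lane => PySem.Int.toStr lane
  | none => "?"

theorem pvCell_insert (d : PySem.Dict Int Int) (k v c : Int) :
    pvCell (d.insert k v) c = if c = k then PySem.Int.toStr v else pvCell d c := by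
  simp [pvCell, PySem.Dict.get?_insert]
  split_ifs <;> rfl

/-- loop invariant: B's 6-slot list tracks the cells of A's inverted dict -/
theorem pv_loop (l : List (Int × Int)) (d : PySem.Dict Int Int) :
    l.foldl (fun (res : List String) kv =>
        if 1 ≤ kv.2 ∧ kv.2 < 7 then res.set (kv.2 - 1).toNat (PySem.Int.toStr kv.1) else res)
      [pvCell d 1, pvCell d 2, pvCell d 3, pvCell d 4, pvCell d 5, pvCell d 6]
    = (let d' := l.foldl (fun d kv => d.insert kv.2 kv.1) d;
       [pvCell d' 1, pvCell d' 2, pvCell d' 3, pvCell d' 4, pvCell d' 5, pvCell d' 6]) := by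
  induction l generalizing d with
  | nil => rfl
  | cons kv t ih =>
    obtain ⟨lane, course⟩ := kv
    simp only [List.foldl_cons]
    rw [← ih (d.insert course lane)]
    congr 1
    by_cases h : 1 ≤ course ∧ course < 7
    · rw [if_pos h]
      obtain ⟨h1, h2⟩ := h
      interval_cases course <;>
        simp [pvCell_insert, List.set]
    · rw [if_neg h]
      simp only [pvCell_insert]
      rw [if_neg (by omega), if_neg (by omega), if_neg (by omega),
          if_neg (by omega), if_neg (by omega), if_neg (by omega)]

-- ===== VERDICT (by name: the statement is the Claim_ definition above) =====
theorem format_course_display_py_spec : Claim_equal_format_course_display_py := by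
  intro ct _
  unfold Spec_format_course_display_py format_course_display_py format_course_display_py_alt
  by_cases h : ct = []
  · simp [h]
  · rw [if_neg h, if_neg h]
    have hinit : (List.replicate 6 "?" : List String)
        = [pvCell PySem.Dict.empty 1, pvCell PySem.Dict.empty 2, pvCell PySem.Dict.empty 3,
           pvCell PySem.Dict.empty 4, pvCell PySem.Dict.empty 5, pvCell PySem.Dict.empty 6] := by
      rfl
    rw [hinit, pv_loop]
    have hrange : PySem.List.pyRange 1 7 1 = [1, 2, 3, 4, 5, 6] := by decide
    rw [hrange]
    rfl
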